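-- pv_equiv track=rewrite | github.com/brianjgreen/AOC2020 | python/aoc-2018/02/part1.py | get_duo_and_trio
-- ===== SOURCE A (Python) =====
-- def get_duo_and_trio(data_set):
--     num_doubles = 0
--     num_triples = 0
--     for box in data_set:
--         found_double = False
--         found_triple = False
--         for id in box:
--             count = box.count(id)
--             if count == 2:
--                 found_double = True
--             elif count == 3:
--                 found_triple = True
--         if found_double:
--             num_doubles += 1
--         if found_triple:
--             num_triples += 1
--
--     return num_doubles, num_triples
-- ===== SOURCE B (Python) =====
-- def get_duo_and_trio(data_set):
--     num_doubles = 0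
--     num_triples = 0
--     for box in data_set:
--         s = sorted(box)
--         found_double = False
--         found_triple = False
--         i = 0
--         n = len(s)
--         while i < n:
--             j = i
--             while j < n and s[j] == s[i]:
--                 j += 1
--             run = j - i
--             if run == 2:
--                 found_double = True
--             elif run == 3:
--                 found_triple = True
--             i = j
--         if found_double:
--             num_doubles += 1
--         if found_triple:
--             num_triples += 1
--     return num_doubles, num_triples
-- ===== Notes on version B (the rewrite author's own statement) =====
-- stated objective: alternative
-- what changed: Sorts each box so equal letters are adjacent, then a single run-length scan over the sorted list sets the double/triple flags from exact run lengths, replacing A's per-character box.count rescans.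
import Mathlib
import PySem

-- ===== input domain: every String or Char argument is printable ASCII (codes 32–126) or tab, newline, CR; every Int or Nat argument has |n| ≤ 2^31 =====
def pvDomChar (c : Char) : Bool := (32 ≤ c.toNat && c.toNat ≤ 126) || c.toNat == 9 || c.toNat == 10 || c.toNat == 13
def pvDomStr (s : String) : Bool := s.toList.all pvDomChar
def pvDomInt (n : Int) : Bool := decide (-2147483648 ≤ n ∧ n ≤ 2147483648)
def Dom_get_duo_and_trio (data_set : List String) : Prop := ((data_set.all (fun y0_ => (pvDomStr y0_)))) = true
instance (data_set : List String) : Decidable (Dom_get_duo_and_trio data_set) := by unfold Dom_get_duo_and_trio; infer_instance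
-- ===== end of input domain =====

-- B sorts each box and takes one run-length scan over the sorted characters instead of A's per-character box.count rescans; objective: alternative.

-- ===== PORT A =====
-- A: for each box, for each character re-count it in the whole box; set flags on count == 2 / == 3.
def get_duo_and_trio (data_set : List String) : Int × Int :=
  data_set.foldl
    (fun (acc : Int × Int) box =>
      let flags := box.toList.foldl
        (fun (fl : Bool × Bool) id =>
          let count := PySem.Chars.count box.toList [id]
          if count = 2 then (true, fl.2)
          else if count = 3 then (fl.1, true)
          else fl)
        (false, false)
      ((if flags.1 then acc.1 + 1 else acc.1),
       (if flags.2 then acc.2 + 1 else acc.2)))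
    (0, 0)

-- ===== PORT B =====
-- B's inner while loops: scan the (sorted) list group by group; each group is the
-- maximal run of equal leading characters, its length is `run`.
def pvRunFlags (l : List Char) (fl : Bool × Bool) : Bool × Bool :=
  match l with
  | [] => fl
  | c :: t =>
    let run := 1 + (t.takeWhile (fun x => x == c)).length
    let fl' := if run = 2 then (true, fl.2) else if run = 3 then (fl.1, true) else fl
    pvRunFlags (t.dropWhile (fun x => x == c)) fl'
termination_by l.length
decreasing_by
  simp only [List.length_cons]
  exact Nat.lt_succ_of_le (List.length_dropWhile_le _ _)

-- B: sort each box, run-length scan sets the flags, then count the boxes.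
def get_duo_and_trio_alt (data_set : List String) : Int × Int :=
  data_set.foldl
    (fun (acc : Int × Int) box =>
      let s := PySem.List.sorted box.toList (fun c => c.toNat) false
      let flags := pvRunFlags s (false, false)
      ((if flags.1 then acc.1 + 1 else acc.1),
       (if flags.2 then acc.2 + 1 else acc.2)))
    (0, 0)

-- ===== PRECONDITION & SPEC =====
def Spec_get_duo_and_trio (data_set : List String) (out : Int × Int) : Prop := out = get_duo_and_trio_alt data_set
instance (data_set : List String) (out : Int × Int) : Decidable (Spec_get_duo_and_trio data_set out) := by unfold Spec_get_duo_and_trio; infer_instance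

-- ===== CLAIM (what is proved, stated in full; the proofs are below) =====
def Claim_equal_get_duo_and_trio : Prop := ∀ (data_set : List String), Dom_get_duo_and_trio data_set → Spec_get_duo_and_trio data_set (get_duo_and_trio data_set)

-- ===== LEMMAS AND PROOFS =====

-- Chars.count with a single-character needle is plain character count
theorem pv_go_single (c : Char) : ∀ (fuel : Nat) (l : List Char) (acc : Nat), l.length ≤ fuel →
    PySem.Chars.count.go [c] fuel l acc = acc + l.count c := by
  intro fuel
  induction fuel with
  | zero =>
    intro l acc h
    cases l with
    | nil => simp [PySem.Chars.count.go]
    | cons x t => simp at h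
  | succ n ih =>
    intro l acc h
    cases l with
    | nil => simp [PySem.Chars.count.go]
    | cons x t =>
      simp only [PySem.Chars.count.go]
      by_cases hx : c = x
      · have hp : List.isPrefixOf [c] (x :: t) = true := by simp [List.isPrefixOf, hx]
        rw [if_pos hp]
        simp only [List.length_cons, List.drop_succ_cons, List.length_nil, List.drop_zero]
        rw [ih t (acc + 1) (by simpa using h)]
        simp [hx]
        omega
      · have hp : List.isPrefixOf [c] (x :: t) = false := by simp [List.isPrefixOf]; exact hx
        rw [if_neg (by simp [hp])]
        rw [ih t acc (by simpa using h)]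
        have : (x == c) = false := by simp; exact fun h => absurd h.symm hx
        simp [List.count_cons, this]

theorem pv_count_single (cs : List Char) (c : Char) : PySem.Chars.count cs [c] = cs.count c := by
  rw [PySem.Chars.count]
  simp only [List.isEmpty_cons]
  rw [pv_go_single c cs.length cs 0 le_rfl]
  simp

-- A's inner flag loop ends with "some character has count 2 / 3 in the box" (or the flag was set).
theorem pv_inner_flags (cs : List Char) (l : List Char) (fl : Bool × Bool) :
    l.foldl
      (fun (fl : Bool × Bool) id =>
        let count := PySem.Chars.count cs [id]
        if count = 2 then (true, fl.2)
        else if count = 3 then (fl.1, true)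
        else fl)
      fl
    = (fl.1 || l.any (fun c => cs.count c == 2),
       fl.2 || l.any (fun c => cs.count c == 3)) := by
  induction l generalizing fl with
  | nil => simp
  | cons c t ih =>
    have hc := pv_count_single cs c
    simp only [List.foldl_cons, List.any_cons, hc]
    rw [ih]
    by_cases h2 : cs.count c = 2
    · simp [h2]
    · by_cases h3 : cs.count c = 3
      · simp [h3, Bool.or_comm]
      · have b2 : (cs.count c == 2) = false := by simp [h2]
        have b3 : (cs.count c == 3) = false := by simp [h3]
        simp [b2, b3, h2, h3]

-- Char.toNat is injective
theorem pv_char_toNat_inj (a b : Char) (h : a.toNat = b.toNat) : a = b :=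
  Char.ext (UInt32.toNat_inj.mp h)

-- In a sorted list c :: t, after dropping the leading run of c's, c never recurs.
theorem pv_c_not_mem_drop (c : Char) (t : List Char)
    (hle : ∀ x ∈ t, c.toNat ≤ x.toNat)
    (hp : t.Pairwise (fun a b => a.toNat ≤ b.toNat)) :
    c ∉ t.dropWhile (fun x => x == c) := by
  induction t with
  | nil => simp
  | cons x t' ih =>
    rcases List.pairwise_cons.mp hp with ⟨hx1, hp'⟩
    by_cases hx : x = c
    · rw [List.dropWhile_cons_of_pos (by simp [hx])]
      exact ih (fun y hy => hle y (List.mem_cons_of_mem _ hy)) hp'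
    · rw [List.dropWhile_cons_of_neg (by simp [hx])]
      intro hmem
      rcases List.mem_cons.mp hmem with h | h
      · exact hx h.symm
      · have h1 : x.toNat ≤ c.toNat := hx1 c h
        have h2 : c.toNat ≤ x.toNat := hle x List.mem_cons_self
        exact hx (pv_char_toNat_inj x c (Nat.le_antisymm h1 h2))

-- the leading-run length in a sorted list c :: t is the multiplicity of c
theorem pv_count_head (c : Char) (t : List Char)
    (hle : ∀ x ∈ t, c.toNat ≤ x.toNat)
    (hp : t.Pairwise (fun a b => a.toNat ≤ b.toNat)) :
    (c :: t).count c = 1 + (t.takeWhile (fun x => x == c)).length := by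
  have hsplit : t.takeWhile (fun x => x == c) ++ t.dropWhile (fun x => x == c) = t :=
    List.takeWhile_append_dropWhile
  have htw : (t.takeWhile (fun x => x == c)).count c
      = (t.takeWhile (fun x => x == c)).length := by
    apply List.count_eq_length.mpr
    intro b hb
    have := List.mem_takeWhile_imp hb
    simp at this
    exact this.symm
  have hrest : (t.dropWhile (fun x => x == c)).count c = 0 :=
    List.count_eq_zero.mpr (pv_c_not_mem_drop c t hle hp)
  have hct : List.count c t = List.count c (t.takeWhile (fun x => x == c) ++ t.dropWhile (fun x => x == c)) := by rw [hsplit]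
  rw [List.count_cons_self, hct, List.count_append, htw, hrest]
  omega

-- a character surviving the drop has all its occurrences there
theorem pv_count_rest (c : Char) (t : List Char) (x : Char)
    (hle : ∀ y ∈ t, c.toNat ≤ y.toNat)
    (hp : t.Pairwise (fun a b => a.toNat ≤ b.toNat))
    (hx : x ∈ t.dropWhile (fun y => y == c)) :
    (c :: t).count x = (t.dropWhile (fun y => y == c)).count x := by
  have hxc : x ≠ c := fun h => pv_c_not_mem_drop c t hle hp (h ▸ hx)
  have hsplit : t.takeWhile (fun y => y == c) ++ t.dropWhile (fun y => y == c) = t :=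
    List.takeWhile_append_dropWhile
  have htw : (t.takeWhile (fun y => y == c)).count x = 0 := by
    apply List.count_eq_zero.mpr
    intro hmem
    have := List.mem_takeWhile_imp hmem
    simp at this
    exact hxc this
  have hct : List.count x t = List.count x (t.takeWhile (fun y => y == c) ++ t.dropWhile (fun y => y == c)) := by rw [hsplit]
  have hcx : (c == x) = false := by simp; exact fun h => hxc h.symm
  rw [List.count_cons, hct, List.count_append, htw]
  simp [hcx]

-- splitting "some char has count n" along the leading run of a sorted list
theorem pv_any_run (c : Char) (t : List Char)
    (hle : ∀ y ∈ t, c.toNat ≤ y.toNat)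
    (hp : t.Pairwise (fun a b => a.toNat ≤ b.toNat)) (n : Nat) :
    (c :: t).any (fun x => (c :: t).count x == n)
    = (((c :: t).count c == n)
       || (t.dropWhile (fun y => y == c)).any
            (fun x => (t.dropWhile (fun y => y == c)).count x == n)) := by
  apply Bool.coe_iff_coe.mp
  simp only [List.any_eq_true, Bool.or_eq_true, beq_iff_eq]
  constructor
  · rintro ⟨x, hx, hcnt⟩
    rcases List.mem_cons.mp hx with rfl | hxt
    · exact Or.inl hcnt
    · have hsplit : t.takeWhile (fun y => y == c) ++ t.dropWhile (fun y => y == c) = t :=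
        List.takeWhile_append_dropWhile
      rw [← hsplit] at hxt
      rcases List.mem_append.mp hxt with hxtw | hxr
      · have : x = c := by have := List.mem_takeWhile_imp hxtw; simpa using this
        subst this
        exact Or.inl hcnt
      · exact Or.inr ⟨x, hxr, by rw [← pv_count_rest c t x hle hp hxr]; exact hcnt⟩
  · rintro (hcnt | ⟨x, hxr, hcnt⟩)
    · exact ⟨c, List.mem_cons_self, hcnt⟩
    · refine ⟨x, ?_, by rw [pv_count_rest c t x hle hp hxr]; exact hcnt⟩
      exact List.mem_cons_of_mem _ ((List.dropWhile_sublist _).subset hxr)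

-- B's run-length scan over a sorted list computes the same two existence flags.
theorem pv_runFlags_eq (n : Nat) : ∀ (l : List Char), l.length ≤ n →
    l.Pairwise (fun a b => a.toNat ≤ b.toNat) → ∀ (fl : Bool × Bool),
    pvRunFlags l fl
    = (fl.1 || l.any (fun c => l.count c == 2),
       fl.2 || l.any (fun c => l.count c == 3)) := by
  induction n with
  | zero =>
    intro l hlen _ fl
    have : l = [] := List.eq_nil_of_length_eq_zero (Nat.le_zero.mp hlen)
    subst this
    simp [pvRunFlags]
  | succ n ih =>
    intro l hlen hp fl
    cases l with
    | nil => simp [pvRunFlags]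
    | cons c t =>
      rcases List.pairwise_cons.mp hp with ⟨hle, hpt⟩
      rw [pvRunFlags]
      have hrl : (t.dropWhile (fun x => x == c)).length ≤ n := by
        have h1 := List.length_dropWhile_le (fun x => x == c) t
        have h2 : (c :: t).length ≤ n + 1 := hlen
        simp only [List.length_cons] at h2
        omega
      have hrp : (t.dropWhile (fun x => x == c)).Pairwise (fun a b => a.toNat ≤ b.toNat) :=
        hpt.sublist (List.dropWhile_sublist _)
      rw [ih _ hrl hrp]
      have hcnt : (c :: t).count c = 1 + (t.takeWhile (fun x => x == c)).length :=
        pv_count_head c t hle hpt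
      have h2 := pv_any_run c t hle hpt 2
      have h3 := pv_any_run c t hle hpt 3
      rw [h2, h3, hcnt]
      by_cases e2 : 1 + (t.takeWhile (fun x => x == c)).length = 2
      · simp [e2]
      · by_cases e3 : 1 + (t.takeWhile (fun x => x == c)).length = 3
        · simp [e3, Bool.or_comm]
        · have b2 : ((1 + (t.takeWhile (fun x => x == c)).length : Nat) == 2) = false := by
            simp [e2]
          have b3 : ((1 + (t.takeWhile (fun x => x == c)).length : Nat) == 3) = false := by
            simp [e3]
          simp [e2, e3, b2, b3]

-- any-count is invariant under permutation (sorting the box)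
theorem pv_any_perm (s l : List Char) (hperm : s.Perm l) (n : Nat) :
    s.any (fun c => s.count c == n) = l.any (fun c => l.count c == n) := by
  apply Bool.coe_iff_coe.mp
  simp only [List.any_eq_true, beq_iff_eq]
  constructor
  · rintro ⟨x, hx, hcnt⟩
    exact ⟨x, hperm.mem_iff.mp hx, by rw [← hperm.count_eq]; exact hcnt⟩
  · rintro ⟨x, hx, hcnt⟩
    exact ⟨x, hperm.mem_iff.mpr hx, by rw [hperm.count_eq]; exact hcnt⟩

-- the two per-box step functions agree
theorem pv_step_eq (acc : Int × Int) (box : String) :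
    (let flags := box.toList.foldl
        (fun (fl : Bool × Bool) id =>
          let count := PySem.Chars.count box.toList [id]
          if count = 2 then (true, fl.2)
          else if count = 3 then (fl.1, true)
          else fl)
        (false, false)
     ((if flags.1 then acc.1 + 1 else acc.1),
      (if flags.2 then acc.2 + 1 else acc.2)))
    =
    (let s := PySem.List.sorted box.toList (fun c => c.toNat) false
     let flags := pvRunFlags s (false, false)
     ((if flags.1 then acc.1 + 1 else acc.1),
      (if flags.2 then acc.2 + 1 else acc.2))) := by
  have hperm : (PySem.List.sorted box.toList (fun c => c.toNat) false).Perm box.toList :=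
    PySem.List.sorted_perm _ _ _
  have hpw : (PySem.List.sorted box.toList (fun c => c.toNat) false).Pairwise
      (fun a b => a.toNat ≤ b.toNat) := PySem.List.sorted_pairwise _ _
  simp only [pv_inner_flags,
    pv_runFlags_eq (PySem.List.sorted box.toList (fun c => c.toNat) false).length _
      le_rfl hpw,
    pv_any_perm _ _ hperm, Bool.false_or]

-- ===== VERDICT (by name: the statement is the Claim_ definition above) =====
theorem get_duo_and_trio_spec : Claim_equal_get_duo_and_trio := by
  intro data_set _
  show get_duo_and_trio data_set = get_duo_and_trio_alt data_set
  unfold get_duo_and_trio get_duo_and_trio_alt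
  apply List.foldl_ext
  intro acc box _
  exact pv_step_eq acc box
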